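-- pv_equiv track=rewrite | github.com/SocialFinanceDigitalLabs/AdventOfCode | solutions/2023/pughmds/python/day13/__main__.py | find_symmetry_line
-- ===== SOURCE A (Python) =====
-- from collections import Counter
--
-- def find_symmetry_line(data):
--     """
--     UNUSED
--
--     Finds repeated elements in a list of strings. Worked as an initial
--     experiment, but found it might be too cumbersome in the long run.
--     Have left for reference, but didn't use in the final solution...
--     """
--     counter = Counter(data)
--     duplicates_with_indices = {}
--
--     for idx, item in enumerate(data):
--         if counter[item] > 1:
--             if item not in duplicates_with_indices:
--                 duplicates_with_indices[item] = [idx]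
--             else:
--                 duplicates_with_indices[item].append(idx)
--
--     return duplicates_with_indices
-- ===== SOURCE B (Python) =====
-- def find_symmetry_line(data):
--     result = {}
--     seen = set()
--     for item in data:
--         if item not in seen:
--             seen.add(item)
--             positions = [i for i, x in enumerate(data) if x == item]
--             if len(positions) > 1:
--                 result[item] = positions
--     return result
-- ===== Notes on version B (the rewrite author's own statement) =====
-- stated objective: alternative
-- what changed: Replaces the Counter-then-conditional-append loop by an outer loop over first occurrences of distinct items that, per new item, rescans the whole list once to collect all its positions and keeps the group only if it has more than one element; no counter and no incremental list-append dict maintenance.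
import Mathlib
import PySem

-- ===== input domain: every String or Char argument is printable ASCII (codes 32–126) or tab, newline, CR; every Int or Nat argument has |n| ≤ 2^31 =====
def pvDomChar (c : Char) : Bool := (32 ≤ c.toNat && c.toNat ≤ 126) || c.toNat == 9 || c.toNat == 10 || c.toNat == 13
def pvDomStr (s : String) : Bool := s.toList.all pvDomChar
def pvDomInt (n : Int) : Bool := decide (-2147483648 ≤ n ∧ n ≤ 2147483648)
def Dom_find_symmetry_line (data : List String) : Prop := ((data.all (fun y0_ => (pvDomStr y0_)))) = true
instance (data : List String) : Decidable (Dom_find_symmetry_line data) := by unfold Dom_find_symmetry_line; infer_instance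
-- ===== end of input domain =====

-- B replaces A's Counter + per-element conditional append by an outer loop over first
-- occurrences of distinct items that rescans the list to collect each item's positions at once
-- and keeps the group only if it has more than one element (objective: alternative).

-- ===== PORT A =====
def find_symmetry_line (data : List String) : List (String × List Int) :=
  ((PySem.List.enumerate data).foldl
    (fun (d : PySem.Dict String (List Int)) p =>
      if (PySem.Dict.counter data).getD p.2 0 > 1 then
        if d.contains p.2 = false then d.insert p.2 [p.1]
        else d.modify p.2 [] (· ++ [p.1])
      else d)
    PySem.Dict.empty).items

-- ===== PORT B =====
-- loop body of B: skip already-seen items, else collect all positions and keep groups of size > 1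
def pvStepB (data : List String) (st : PySem.Set String × PySem.Dict String (List Int))
    (item : String) : PySem.Set String × PySem.Dict String (List Int) :=
  if PySem.Set.contains st.1 item then st
  else
    let positions := ((PySem.List.enumerate data).filter (fun p => p.2 == item)).map (·.1)
    (PySem.Set.add st.1 item,
     if positions.length > 1 then st.2.insert item positions else st.2)

def find_symmetry_line_alt (data : List String) : List (String × List Int) :=
  (data.foldl (pvStepB data) (PySem.Set.empty, PySem.Dict.empty)).2.items

-- ===== PRECONDITION & SPEC =====
def Spec_find_symmetry_line (data : List String) (out : List (String × List Int)) : Prop := out = find_symmetry_line_alt data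
instance (data : List String) (out : List (String × List Int)) : Decidable (Spec_find_symmetry_line data out) := by unfold Spec_find_symmetry_line; infer_instance

-- ===== CLAIM (what is proved, stated in full; the proofs are below) =====
def Claim_equal_find_symmetry_line : Prop := ∀ (data : List String), Dom_find_symmetry_line data → Spec_find_symmetry_line data (find_symmetry_line data)

-- ===== LEMMAS AND PROOFS =====

-- all positions of k in data, in order (the value both programs store for a duplicated k)
def pvPos (data : List String) (k : String) : List Int :=
  ((PySem.List.enumerate data).filter (fun p => p.2 == k)).map (·.1)

-- "k is duplicated in data"
def pvQ (data : List String) (k : String) : Bool := decide (1 < List.count k data)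

-- the common canonical value: duplicated items in first-occurrence order with all their indices
def pvCanon (data : List String) : List (String × List Int) :=
  ((PySem.Set.ofList data).filter (pvQ data)).map (fun k => (k, pvPos data k))

-- set(filter) commutes with filtering the deduplicated list
theorem pv_ofList_filter {α : Type} [BEq α] [LawfulBEq α] (q : α → Bool) (xs : List α) :
    PySem.Set.ofList (xs.filter q) = (PySem.Set.ofList xs).filter q := by
  induction xs using List.reverseRecOn with
  | nil => rfl
  | append_singleton xs x ih =>
    rw [List.filter_append, PySem.Set.ofList_append_singleton, PySem.Set.add_eq_ite]
    by_cases hq : q x = true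
    · have h1 : List.filter q [x] = [x] := by simp [hq]
      rw [h1, PySem.Set.ofList_append_singleton, PySem.Set.add_eq_ite, ih]
      by_cases hx : x ∈ PySem.Set.ofList xs
      · rw [if_pos hx, if_pos (List.mem_filter.mpr ⟨hx, hq⟩)]
      · rw [if_neg hx, if_neg (fun h => hx (List.mem_filter.mp h).1), List.filter_append, h1]
    · have h1 : List.filter q [x] = [] := by simp [hq]
      rw [h1, List.append_nil, ih]
      by_cases hx : x ∈ PySem.Set.ofList xs
      · rw [if_pos hx]
      · rw [if_neg hx, List.filter_append, h1, List.append_nil]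

-- value of key c after a grouping fold (key is the SECOND component of each pair)
theorem pv_getD_gfold (l : List (Int × String)) (d : PySem.Dict String (List Int)) (c : String) :
    (l.foldl (fun d p => d.modify p.2 [] (· ++ [p.1])) d).getD c [] =
      d.getD c [] ++ (l.filter (fun p => p.2 == c)).map (·.1) := by
  have hswap : l.foldl (fun d p => d.modify p.2 [] (· ++ [p.1])) d =
      (l.map Prod.swap).foldl (fun d p => d.modify p.1 [] (· ++ [p.2])) d := by
    rw [List.foldl_map]
    rfl
  rw [hswap, PySem.Dict.getD_foldl_modify_append]
  congr 1
  rw [List.filter_map]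
  simp [List.map_map, Function.comp_def, Prod.swap]

theorem pv_pos_length (data : List String) (k : String) :
    (pvPos data k).length = List.count k data := by
  unfold pvPos
  rw [List.length_map, ← List.countP_eq_length_filter, List.count_eq_countP]
  conv_rhs => rw [← PySem.List.map_snd_enumerate data 0, List.countP_map]
  rfl

-- A computes the canonical value
theorem pv_A_canon (data : List String) : find_symmetry_line data = pvCanon data := by
  unfold find_symmetry_line pvCanon
  set q : String → Bool := pvQ data with hq
  set l : List (Int × String) := PySem.List.enumerate data with hl
  set step : PySem.Dict String (List Int) → (Int × String) → PySem.Dict String (List Int) :=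
    fun d p => d.modify p.2 [] (· ++ [p.1]) with hstep
  have hbody : ∀ (d : PySem.Dict String (List Int)) (p : Int × String),
      (if (PySem.Dict.counter data).getD p.2 0 > 1 then
        if d.contains p.2 = false then d.insert p.2 [p.1]
        else d.modify p.2 [] (· ++ [p.1])
      else d) = if q p.2 then step d p else d := by
    intro d p
    have hc : ((PySem.Dict.counter data).getD p.2 0 > 1) ↔ (q p.2 = true) := by
      rw [PySem.Dict.getD_counter]; simp [hq, pvQ]
    by_cases h : q p.2 = true
    · rw [if_pos (hc.mpr h), if_pos h]
      by_cases hcont : d.contains p.2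
      · rw [if_neg (by simp [hcont])]
      · have hcf : d.contains p.2 = false := by simpa using hcont
        rw [hcf, if_pos rfl]
        show d.insert p.2 [p.1] = d.insert p.2 (d.getD p.2 [] ++ [p.1])
        rw [PySem.Dict.getD_of_not_contains d [] hcf]
        rfl
    · have h' : ¬ ((PySem.Dict.counter data).getD p.2 0 > 1) := fun hh => h (hc.mp hh)
      rw [if_neg h', if_neg h]
  simp only [hbody]
  rw [← List.foldl_filter (p := fun p => q p.2) (f := step)]
  set dA : PySem.Dict String (List Int) := (l.filter (fun p => q p.2)).foldl step PySem.Dict.empty with hdA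
  have hnodupA : dA.keys.Nodup := by
    rw [hdA, hstep]
    exact PySem.Dict.nodup_keys_foldl_modify_key _ (fun p : Int × String => p.2) []
      (fun _ p (v : List Int) => v ++ [p.1]) _ PySem.Dict.nodup_keys_empty
  have hsnd : l.map (fun p => p.2) = data := PySem.List.map_snd_enumerate data 0
  have hkeysA : dA.keys = (PySem.Set.ofList data).filter q := by
    rw [hdA, hstep,
      PySem.Dict.keys_foldl_modify_key _ (fun p : Int × String => p.2) []
      (fun _ p (v : List Int) => v ++ [p.1]) _]
    rw [PySem.Dict.keys_empty, PySem.Set.update_nil_left]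
    have hfm : List.map (fun p => p.2) (l.filter (fun p => q p.2)) = data.filter q := by
      show List.map (fun p : Int × String => p.2) (List.filter (q ∘ fun p => p.2) l) = _
      rw [← List.filter_map, hsnd]
    rw [hfm, pv_ofList_filter]
  rw [PySem.Dict.items_eq_map_keys dA hnodupA [], hkeysA]
  apply List.map_congr_left
  intro k hk
  have hqk : q k = true := (List.mem_filter.mp hk).2
  congr 1
  rw [hdA, hstep, pv_getD_gfold, PySem.Dict.getD_empty, List.nil_append]
  rw [List.filter_filter]
  show _ = pvPos data k
  unfold pvPos
  rw [← hl]
  congr 1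
  apply List.filter_congr
  intro p _
  by_cases hpk : p.2 == k
  · have : p.2 = k := eq_of_beq hpk
    simp [this, hqk]
  · simp [hpk]

-- loop invariant of B's fold: seen = set of the processed prefix, result = its duplicated
-- items (by position-list length) with their positions
theorem pv_B_invariant (data : List String) (l : List String) :
    (l.foldl (pvStepB data) (PySem.Set.empty, PySem.Dict.empty)).1 = PySem.Set.ofList l ∧
    (l.foldl (pvStepB data) (PySem.Set.empty, PySem.Dict.empty)).2.items =
      ((PySem.Set.ofList l).filter (fun k => decide ((pvPos data k).length > 1))).map
        (fun k => (k, pvPos data k)) := by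
  induction l using List.reverseRecOn with
  | nil => exact ⟨rfl, rfl⟩
  | append_singleton l x ih =>
    obtain ⟨h1, h2⟩ := ih
    rw [List.foldl_append, List.foldl_cons, List.foldl_nil]
    set st := l.foldl (pvStepB data) (PySem.Set.empty, PySem.Dict.empty) with hst
    by_cases hx : x ∈ PySem.Set.ofList l
    · have hc : PySem.Set.contains st.1 x = true := by
        rw [h1, PySem.Set.contains_iff]; exact hx
      unfold pvStepB
      rw [if_pos hc, PySem.Set.ofList_append_singleton, PySem.Set.add_of_mem hx]
      exact ⟨h1, h2⟩
    · have hc : ¬ (PySem.Set.contains st.1 x = true) := by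
        rw [h1, PySem.Set.contains_iff]; exact hx
      have hset : PySem.Set.ofList (l ++ [x]) = PySem.Set.ofList l ++ [x] := by
        rw [PySem.Set.ofList_append_singleton, PySem.Set.add_of_not_mem hx]
      have hposeq : ((PySem.List.enumerate data).filter (fun p => p.2 == x)).map (·.1) =
          pvPos data x := rfl
      unfold pvStepB
      rw [if_neg hc]
      dsimp only
      rw [hposeq]
      constructor
      · rw [h1, PySem.Set.add_of_not_mem hx, hset]
      · rw [hset, List.filter_append, List.map_append]
        by_cases hq : (pvPos data x).length > 1
        · have hnotk : st.2.contains x = false := by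
            rw [PySem.Dict.contains_eq_decide_mem_keys, decide_eq_false_iff_not]
            intro hmem
            have hmem' : x ∈ (((PySem.Set.ofList l).filter
                (fun k => decide ((pvPos data k).length > 1))).map
                (fun k => (k, pvPos data k))).map (·.1) := by
              simpa [PySem.Dict.keys, h2] using hmem
            simp only [List.map_map, List.mem_map, Function.comp] at hmem'
            obtain ⟨k, hk, hke⟩ := hmem'
            exact hx (by rw [← hke]; exact (List.mem_filter.mp hk).1)
          rw [if_pos hq, PySem.Dict.items_insert_of_not_contains _ _ hnotk, h2]
          simp [hq]
        · rw [if_neg hq, h2]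
          simp [hq]

-- B computes the canonical value
theorem pv_B_canon (data : List String) : find_symmetry_line_alt data = pvCanon data := by
  unfold find_symmetry_line_alt pvCanon
  rw [(pv_B_invariant data data).2]
  congr 1
  apply List.filter_congr
  intro k _
  rw [pv_pos_length]
  rfl

-- ===== VERDICT (by name: the statement is the Claim_ definition above) =====
theorem find_symmetry_line_spec : Claim_equal_find_symmetry_line := by
  intro data _
  unfold Spec_find_symmetry_line
  rw [pv_A_canon, pv_B_canon]
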